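-- pv_equiv track=rewrite | github.com/tornadoslims/saltdesktop-web | salt_agent/cli.py | _extract_first_def
-- ===== SOURCE A (Python) =====
-- def _extract_first_def(text: str) -> str:
--     """Extract the first function/class/import definition from text."""
--     for line in text.split("\n"):
--         stripped = line.strip()
--         for prefix in ("def ", "class ", "import ", "from "):
--             if stripped.startswith(prefix):
--                 snippet = stripped[:60]
--                 if len(stripped) > 60:
--                     snippet += "..."
--                 return snippet
--     # Fallback: first non-empty line
--     for line in text.split("\n"):
--         stripped = line.strip()
--         if stripped:
--             snippet = stripped[:60]
--             if len(stripped) > 60: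
--                 snippet += "..."
--             return snippet
--     return ""
-- ===== SOURCE B (Python) =====
-- def _extract_first_def(text: str) -> str:
--     """Extract the first function/class/import definition from text."""
--     def trunc(s: str) -> str:
--         return s[:60] + "..." if len(s) > 60 else s[:60]
--     fallback = None
--     for line in text.split("\n"):
--         stripped = line.strip()
--         if stripped.startswith(("def ", "class ", "import ", "from ")):
--             return trunc(stripped)
--         if stripped and fallback is None:
--             fallback = stripped
--     return trunc(fallback) if fallback is not None else ""
-- ===== Notes on version B (the rewrite author's own statement) =====
-- stated objective: simpler
-- what changed: B makes a single pass over the lines, recording the first non-empty line as a fallback while scanning for a prefixed line, and factors the truncation into a helper, instead of A's two separate scans of text.split.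
import Mathlib
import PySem

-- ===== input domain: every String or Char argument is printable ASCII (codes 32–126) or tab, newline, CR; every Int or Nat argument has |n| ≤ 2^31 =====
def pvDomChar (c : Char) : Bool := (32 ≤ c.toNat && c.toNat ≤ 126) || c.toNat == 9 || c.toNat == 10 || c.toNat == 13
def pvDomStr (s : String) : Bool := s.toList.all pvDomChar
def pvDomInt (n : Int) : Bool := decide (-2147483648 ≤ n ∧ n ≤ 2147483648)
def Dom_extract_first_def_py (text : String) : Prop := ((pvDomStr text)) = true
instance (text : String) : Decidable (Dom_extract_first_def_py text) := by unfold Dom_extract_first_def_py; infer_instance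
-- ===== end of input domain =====

-- ===== PORT A =====
-- One line changed: B does one pass over the lines with a recorded fallback instead of A's two passes (objective: simpler).

-- snippet = stripped[:60]; if len(stripped) > 60: snippet += "..."  (A computes this inline at each return site)
def pvSnipA (stripped : List Char) : String :=
  let snippet := PySem.Chars.slice stripped none (some 60)
  if 60 < stripped.length then String.ofList (snippet ++ "...".toList) else String.ofList snippet

-- first loop of A: return the snippet of the first stripped line starting with one of the prefixes
def pvLoopA1 : List (List Char) → Option String
  | [] => none
  | l :: rest =>
    let stripped := PySem.Chars.strip l
    if PySem.Chars.startswith stripped "def ".toList then some (pvSnipA stripped)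
    else if PySem.Chars.startswith stripped "class ".toList then some (pvSnipA stripped)
    else if PySem.Chars.startswith stripped "import ".toList then some (pvSnipA stripped)
    else if PySem.Chars.startswith stripped "from ".toList then some (pvSnipA stripped)
    else pvLoopA1 rest

-- second loop of A: snippet of the first non-empty stripped line
def pvLoopA2 : List (List Char) → Option String
  | [] => none
  | l :: rest =>
    let stripped := PySem.Chars.strip l
    if stripped ≠ [] then some (pvSnipA stripped) else pvLoopA2 rest

def extract_first_def_py (text : String) : String :=
  let lines := PySem.Chars.splitOn text.toList "\n".toList
  match pvLoopA1 lines with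
  | some s => s
  | none =>
    match pvLoopA2 lines with
    | some s => s
    | none => ""

-- ===== PORT B =====
-- trunc(s) = s[:60] + "..." if len(s) > 60 else s[:60]
def pvTruncB (s : List Char) : String :=
  if 60 < s.length then String.ofList (PySem.Chars.slice s none (some 60) ++ "...".toList)
  else String.ofList (PySem.Chars.slice s none (some 60))

def pvStartsAnyB (s : List Char) : Bool :=
  PySem.Chars.startswith s "def ".toList || PySem.Chars.startswith s "class ".toList ||
  PySem.Chars.startswith s "import ".toList || PySem.Chars.startswith s "from ".toList

-- B's single pass, carrying the fallback (first non-empty, non-prefixed line seen)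
def pvLoopB : List (List Char) → Option (List Char) → String
  | [], fallback =>
    match fallback with
    | some f => pvTruncB f
    | none => ""
  | l :: rest, fallback =>
    let stripped := PySem.Chars.strip l
    if pvStartsAnyB stripped then pvTruncB stripped
    else pvLoopB rest (if stripped ≠ [] && fallback.isNone then some stripped else fallback)

def extract_first_def_py_alt (text : String) : String :=
  pvLoopB (PySem.Chars.splitOn text.toList "\n".toList) none

-- ===== PRECONDITION & SPEC =====
def Spec_extract_first_def_py (text : String) (out : String) : Prop := out = extract_first_def_py_alt text
instance (text : String) (out : String) : Decidable (Spec_extract_first_def_py text out) := by unfold Spec_extract_first_def_py; infer_instance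

-- ===== CLAIM (what is proved, stated in full; the proofs are below) =====
def Claim_equal_extract_first_def_py : Prop := ∀ (text : String), Dom_extract_first_def_py text → Spec_extract_first_def_py text (extract_first_def_py text)

-- ===== LEMMAS AND PROOFS =====
theorem pvLoopB_eq (lines : List (List Char)) (fb : Option (List Char)) :
    pvLoopB lines fb =
      match pvLoopA1 lines with
      | some s => s
      | none =>
        match fb with
        | some f => pvTruncB f
        | none => match pvLoopA2 lines with | some s => s | none => "" := by
  induction lines generalizing fb with
  | nil => cases fb <;> rfl
  | cons l rest ih =>
    simp only [pvLoopB, pvLoopA1, pvLoopA2, pvStartsAnyB]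
    by_cases h1 : PySem.Chars.startswith (PySem.Chars.strip l) "def ".toList = true
    · simp only [h1]; simp [pvTruncB, pvSnipA]
    · rw [Bool.not_eq_true] at h1
      by_cases h2 : PySem.Chars.startswith (PySem.Chars.strip l) "class ".toList = true
      · simp only [h1, h2]; simp [pvTruncB, pvSnipA]
      · rw [Bool.not_eq_true] at h2
        by_cases h3 : PySem.Chars.startswith (PySem.Chars.strip l) "import ".toList = true
        · simp only [h1, h2, h3]; simp [pvTruncB, pvSnipA]
        · rw [Bool.not_eq_true] at h3
          by_cases h4 : PySem.Chars.startswith (PySem.Chars.strip l) "from ".toList = true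
          · simp only [h1, h2, h3, h4]; simp [pvTruncB, pvSnipA]
          · rw [Bool.not_eq_true] at h4
            simp only [h1, h2, h3, h4, Bool.or_self]
            rw [ih]
            cases fb with
            | some f => simp
            | none =>
              by_cases h5 : PySem.Chars.strip l = []
              · simp [h5]
              · simp [h5, pvTruncB, pvSnipA]

-- ===== VERDICT (by name: the statement is the Claim_ definition above) =====
theorem extract_first_def_py_spec : Claim_equal_extract_first_def_py := by
  intro text _
  unfold Spec_extract_first_def_py extract_first_def_py extract_first_def_py_alt
  rw [pvLoopB_eq]
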